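-- pv_equiv track=rewrite | github.com/tylerdonison/PokeAPI-Data-Analysis | Final.py | append_with_extras
-- ===== SOURCE A (Python) =====
-- def append_with_extras(poke_list):
--     """These extras are extra forms or pokemon that aren't in the pokedex per se
--     but should be included in the searches as they increase the type counts and
--     stats for specific pokemon. IE the pokemon Rotom is an Electric/Ghost, but it's
--     alt forms can be Electric/Fire, Electric/Grass, Electric/Water, Electric/Ice, etc
--     and should be counted as a fire, grass, ect Pokemon.
--     Another example is Deoxys. Deoxy has different forms that drastically change its
--     stats, including making it the fastest pokemon in speed form"""
--
--     #for full seach, for the 10001-10228 range, don't include: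
--     #10016, 10024-25, 10061, 10080-85, 10093-99, 10116-19,
--     #10121-22, 10127-51, 10153-60, 10182-84, 10187, 10192
--     #include 10001-15, 10017-23, 10026-10060, 10062-10079, 10086-10092, 10100-10115,
--     #10120, 10123-26, 10152, 10161-10181, 10185-86, 10188-10191, 10193-10194
--     for i in range(10001, 10016):
--         poke_list.append(i)
--     for i in range(10017, 10024):
--         poke_list.append(i)
--     for i in range(10026, 10061):
--         poke_list.append(i)
--     for i in range(10062, 10080):
--         poke_list.append(i)
--     for i in range(10086, 10090):
--         poke_list.append(i)
--     for i in range(10091, 10093):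
--         poke_list.append(i)
--     for i in range(10100, 10116):
--         poke_list.append(i)
--     poke_list.append(10120)
--     for i in range(10123, 10127):
--         poke_list.append(i)
--     poke_list.append(10152)
--     for i in range(10161, 10182):
--         poke_list.append(i)
--     for i in range(10185, 10187):
--         poke_list.append(i)
--     for i in range(10188, 10190):
--         poke_list.append(i)
--     poke_list.append(10191)
--     for i in range(10193, 10195):
--         poke_list.append(i)
--     return poke_list
-- ===== SOURCE B (Python) =====
-- # B: instead of appending fifteen disjoint ranges, scan the full span 10001..10194
-- # once and append every id NOT in the fixed set of excluded (gap) ids.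
-- EXCLUDED = frozenset({
--     10016, 10024, 10025, 10061, 10080, 10081, 10082, 10083, 10084, 10085,
--     10090, 10093, 10094, 10095, 10096, 10097, 10098, 10099, 10116, 10117,
--     10118, 10119, 10121, 10122, 10127, 10128, 10129, 10130, 10131, 10132,
--     10133, 10134, 10135, 10136, 10137, 10138, 10139, 10140, 10141, 10142,
--     10143, 10144, 10145, 10146, 10147, 10148, 10149, 10150, 10151, 10153,
--     10154, 10155, 10156, 10157, 10158, 10159, 10160, 10182, 10183, 10184,
--     10187, 10190, 10192,
-- })
--
--
-- def append_with_extras(poke_list):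
--     for i in range(10001, 10195):
--         if i not in EXCLUDED:
--             poke_list.append(i)
--     return poke_list
-- ===== Notes on version B (the rewrite author's own statement) =====
-- stated objective: alternative
-- what changed: B appends the complement: one scan over the whole span 10001..10194 with a membership test against a fixed set of 63 excluded ids, instead of A's fifteen separate per-range append loops.
import Mathlib
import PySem

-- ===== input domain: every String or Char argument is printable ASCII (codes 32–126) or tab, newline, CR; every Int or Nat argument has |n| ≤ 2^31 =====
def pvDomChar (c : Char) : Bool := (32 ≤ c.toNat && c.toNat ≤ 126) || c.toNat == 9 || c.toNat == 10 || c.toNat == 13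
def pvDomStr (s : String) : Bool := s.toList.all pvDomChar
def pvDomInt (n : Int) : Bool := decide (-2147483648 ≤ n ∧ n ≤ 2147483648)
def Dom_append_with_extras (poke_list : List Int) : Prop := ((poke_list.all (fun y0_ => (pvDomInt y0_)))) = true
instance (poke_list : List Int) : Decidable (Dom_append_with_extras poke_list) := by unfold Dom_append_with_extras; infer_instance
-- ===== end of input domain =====

-- B appends the complement: one scan of the full span 10001..10194 skipping a fixed set of
-- 63 excluded ids, instead of A's fifteen per-range append loops (objective: alternative).
-- Both Pythons mutate poke_list in place identically; the theorems are about the return value.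

-- ===== PORT A =====
-- A: fifteen explicit loops/appends, each ported as a foldl appending one element at a time.
def append_with_extras (poke_list : List Int) : List Int :=
  let l := (PySem.List.pyRange 10001 10016 1).foldl (fun acc i => acc ++ [i]) poke_list
  let l := (PySem.List.pyRange 10017 10024 1).foldl (fun acc i => acc ++ [i]) l
  let l := (PySem.List.pyRange 10026 10061 1).foldl (fun acc i => acc ++ [i]) l
  let l := (PySem.List.pyRange 10062 10080 1).foldl (fun acc i => acc ++ [i]) l
  let l := (PySem.List.pyRange 10086 10090 1).foldl (fun acc i => acc ++ [i]) l
  let l := (PySem.List.pyRange 10091 10093 1).foldl (fun acc i => acc ++ [i]) l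
  let l := (PySem.List.pyRange 10100 10116 1).foldl (fun acc i => acc ++ [i]) l
  let l := l ++ [10120]
  let l := (PySem.List.pyRange 10123 10127 1).foldl (fun acc i => acc ++ [i]) l
  let l := l ++ [10152]
  let l := (PySem.List.pyRange 10161 10182 1).foldl (fun acc i => acc ++ [i]) l
  let l := (PySem.List.pyRange 10185 10187 1).foldl (fun acc i => acc ++ [i]) l
  let l := (PySem.List.pyRange 10188 10190 1).foldl (fun acc i => acc ++ [i]) l
  let l := l ++ [10191]
  let l := (PySem.List.pyRange 10193 10195 1).foldl (fun acc i => acc ++ [i]) l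
  l

-- ===== PORT B =====
-- B's EXCLUDED frozenset of gap ids
def pvEXCLUDED : PySem.Set Int :=
  PySem.Set.ofList
    [10016, 10024, 10025, 10061, 10080, 10081, 10082, 10083, 10084, 10085,
     10090, 10093, 10094, 10095, 10096, 10097, 10098, 10099, 10116, 10117,
     10118, 10119, 10121, 10122, 10127, 10128, 10129, 10130, 10131, 10132,
     10133, 10134, 10135, 10136, 10137, 10138, 10139, 10140, 10141, 10142,
     10143, 10144, 10145, 10146, 10147, 10148, 10149, 10150, 10151, 10153,
     10154, 10155, 10156, 10157, 10158, 10159, 10160, 10182, 10183, 10184,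
     10187, 10190, 10192]

def append_with_extras_alt (poke_list : List Int) : List Int :=
  (PySem.List.pyRange 10001 10195 1).foldl
    (fun acc i => if pvEXCLUDED.contains i then acc else acc ++ [i]) poke_list

-- ===== PRECONDITION & SPEC =====
def Spec_append_with_extras (poke_list : List Int) (out : List Int) : Prop := out = append_with_extras_alt poke_list
instance (poke_list : List Int) (out : List Int) : Decidable (Spec_append_with_extras poke_list out) := by unfold Spec_append_with_extras; infer_instance

-- ===== CLAIM (what is proved, stated in full; the proofs are below) =====
def Claim_equal_append_with_extras : Prop := ∀ (poke_list : List Int), Dom_append_with_extras poke_list → Spec_append_with_extras poke_list (append_with_extras poke_list)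

-- ===== LEMMAS AND PROOFS =====
theorem foldl_skip_append (p : Int → Prop) [DecidablePred p] (l : List Int) (acc : List Int) :
    l.foldl (fun a i => if p i then a else a ++ [i]) acc
      = acc ++ l.filter (fun i => decide ¬ p i) := by
  induction l generalizing acc with
  | nil => simp
  | cons x xs ih => by_cases h : p x <;> simp [List.foldl, h, ih]

theorem alt_as_append (poke_list : List Int) :
    append_with_extras_alt poke_list = poke_list ++ append_with_extras_alt [] := by
  simp [append_with_extras_alt, foldl_skip_append]

theorem a_as_append (poke_list : List Int) :
    append_with_extras poke_list = poke_list ++ append_with_extras [] := by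
  simp [append_with_extras]

set_option maxRecDepth 100000 in
set_option maxHeartbeats 4000000 in
theorem nil_case : append_with_extras ([] : List Int) = append_with_extras_alt [] := by
  decide

-- ===== VERDICT (by name: the statement is the Claim_ definition above) =====
theorem append_with_extras_spec : Claim_equal_append_with_extras := by
  intro poke_list _
  show append_with_extras poke_list = append_with_extras_alt poke_list
  rw [a_as_append, alt_as_append, nil_case]
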